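-- pv_equiv track=rewrite | github.com/egpivo/data-structure-algorithm-practice | problems/minimumNumberOfDaysToMakeMBouquets/python/minimum_number_of_days_to_make_m_bouquets.py | _canMakeBouquets
-- ===== SOURCE A (Python) =====
-- def _canMakeBouquets(days, bloomDay, m, k):
--     bouquets = 0
--     flowers = 0
--     for day in bloomDay:
--         if day <= days:
--             flowers += 1
--             if flowers == k:
--                 bouquets += 1
--                 flowers = 0
--         else:
--             flowers = 0
--         if bouquets >= m:
--             return True
--     return bouquets >= m
-- ===== SOURCE B (Python) =====
-- def _canMakeBouquets(days, bloomDay, m, k):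
--     # Barrier-position decomposition: the indices of unbloomed flowers (day > days)
--     # are barriers; padded with -1 and len(bloomDay), each gap between consecutive
--     # bounds holds hi - lo - 1 adjacent bloomed flowers, contributing (hi-lo-1)//k
--     # bouquets.  k <= 0 forms no bouquets, as in the original.
--     if k <= 0:
--         return 0 >= m
--     bounds = [-1] + [i for i, d in enumerate(bloomDay) if d > days] + [len(bloomDay)]
--     total = sum((hi - lo - 1) // k for lo, hi in zip(bounds, bounds[1:]))
--     return total >= m
-- ===== Notes on version B (the rewrite author's own statement) =====
-- stated objective: alternative
-- what changed: B replaces A's single-pass per-flower counter (reset at k, early return) by a staged computation: it materializes the index positions of unbloomed flowers as barriers, pads them with -1 and len(bloomDay), and sums (hi-lo-1)//k over consecutive bound pairs; k <= 0 is guarded up front to yield zero bouquets as A does.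
import Mathlib
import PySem

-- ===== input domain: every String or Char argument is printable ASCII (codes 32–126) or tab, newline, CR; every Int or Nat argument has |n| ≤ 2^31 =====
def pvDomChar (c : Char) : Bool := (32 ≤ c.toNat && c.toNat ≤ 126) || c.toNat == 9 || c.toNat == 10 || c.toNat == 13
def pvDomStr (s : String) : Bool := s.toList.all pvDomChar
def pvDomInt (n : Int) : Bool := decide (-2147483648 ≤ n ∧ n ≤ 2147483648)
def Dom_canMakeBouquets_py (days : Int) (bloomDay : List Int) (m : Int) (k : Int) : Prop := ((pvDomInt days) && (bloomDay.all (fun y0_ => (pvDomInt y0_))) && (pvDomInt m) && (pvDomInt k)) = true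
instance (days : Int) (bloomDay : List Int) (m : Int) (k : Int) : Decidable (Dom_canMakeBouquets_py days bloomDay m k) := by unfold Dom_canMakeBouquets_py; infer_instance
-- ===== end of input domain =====

-- B replaces A's per-flower counter (reset at k, early return) by a staged
-- barrier-index computation: indices of unbloomed flowers padded with -1 and n,
-- summing (hi-lo-1)//k over consecutive bound pairs; same cost, different algorithm.

-- ===== PORT A =====
-- the loop of A: state (bouquets, flowers), early return True when bouquets >= m
def canMakeBouquets_goA (days m k : Int) (bouquets flowers : Int) : List Int → Bool
  | [] => decide (bouquets ≥ m)
  | d :: rest =>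
    let p : Int × Int :=
      if d ≤ days then
        (if flowers + 1 = k then (bouquets + 1, 0) else (bouquets, flowers + 1))
      else (bouquets, 0)
    if p.1 ≥ m then true else canMakeBouquets_goA days m k p.1 p.2 rest

def canMakeBouquets_py (days : Int) (bloomDay : List Int) (m : Int) (k : Int) : Bool :=
  canMakeBouquets_goA days m k 0 0 bloomDay

-- ===== PORT B =====
-- Source B: bounds = [-1] + [i for i, d in enumerate(bloomDay) if d > days] + [len(bloomDay)]
--       total = sum((hi - lo - 1) // k for lo, hi in zip(bounds, bounds[1:]))
def canMakeBouquets_py_alt (days : Int) (bloomDay : List Int) (m : Int) (k : Int) : Bool :=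
  if k ≤ 0 then decide ((0:Int) ≥ m)
  else
    let bounds : List Int :=
      -1 :: (((PySem.List.enumerate bloomDay 0).filter (fun p => decide (days < p.2))).map (·.1)
              ++ [(bloomDay.length : Int)])
    let total := ((bounds.zip bounds.tail).map
        (fun p => PySem.Int.floordiv (p.2 - p.1 - 1) k)).sum
    decide (total ≥ m)

-- ===== PRECONDITION & SPEC =====
def Spec_canMakeBouquets_py (days : Int) (bloomDay : List Int) (m : Int) (k : Int) (out : Bool) : Prop := out = canMakeBouquets_py_alt days bloomDay m k
instance (days : Int) (bloomDay : List Int) (m : Int) (k : Int) (out : Bool) : Decidable (Spec_canMakeBouquets_py days bloomDay m k out) := by unfold Spec_canMakeBouquets_py; infer_instance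

-- ===== CLAIM (what is proved, stated in full; the proofs are below) =====
def Claim_equal_canMakeBouquets_py : Prop := ∀ (days : Int) (bloomDay : List Int) (m : Int) (k : Int), Dom_canMakeBouquets_py days bloomDay m k → Spec_canMakeBouquets_py days bloomDay m k (canMakeBouquets_py days bloomDay m k)

-- ===== LEMMAS AND PROOFS =====

-- proof-side helper: a run-length fold, intermediate between A's counter and B's gaps
def canMakeBouquets_stepB (days k : Int) (st : Int × Int) (d : Int) : Int × Int :=
  if d ≤ days then (st.1, st.2 + 1) else (st.1 + PySem.Int.floordiv st.2 k, 0)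

-- proof-side helper: the gap sum over a bound list, given the previous bound
def canMakeBouquets_S (k : Int) : Int → List Int → Int
  | _, [] => 0
  | b, c :: rest => PySem.Int.floordiv (c - b - 1) k + canMakeBouquets_S k c rest

-- B's zip-of-consecutive-pairs sum equals the gap sum S
theorem zipSum_eq_S (k : Int) :
    ∀ (rest : List Int) (b : Int),
      (((b :: rest).zip rest).map (fun p => PySem.Int.floordiv (p.2 - p.1 - 1) k)).sum
        = canMakeBouquets_S k b rest := by
  intro rest
  induction rest with
  | nil => intro b; simp [canMakeBouquets_S]
  | cons c rest ih =>
    intro b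
    simp [canMakeBouquets_S, ih c]

-- shifting the accumulated total out of the fold
theorem foldB_shift (days k : Int) :
    ∀ (xs : List Int) (t r : Int),
      xs.foldl (canMakeBouquets_stepB days k) (t, r)
        = (t + (xs.foldl (canMakeBouquets_stepB days k) (0, r)).1,
           (xs.foldl (canMakeBouquets_stepB days k) (0, r)).2) := by
  intro xs
  induction xs with
  | nil => intro t r; simp
  | cons d rest ih =>
    intro t r
    by_cases hd : d ≤ days
    · simp only [List.foldl, canMakeBouquets_stepB, hd, if_pos]
      exact ih t (r + 1)
    · simp only [List.foldl, canMakeBouquets_stepB, hd, if_neg, not_false_iff]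
      rw [ih (t + PySem.Int.floordiv r k) 0, ih (0 + PySem.Int.floordiv r k) 0]
      simp only [Prod.mk.injEq]
      exact ⟨by ring, trivial⟩

-- the gap sum over B's bounds equals the run-length fold's total
theorem S_eq_foldB (days k : Int) :
    ∀ (xs : List Int) (i0 b : Int),
      canMakeBouquets_S k b
          ((((PySem.List.enumerate xs i0).filter (fun p => decide (days < p.2))).map (·.1))
            ++ [i0 + (xs.length : Int)])
        = (xs.foldl (canMakeBouquets_stepB days k) (0, i0 - b - 1)).1
          + PySem.Int.floordiv (xs.foldl (canMakeBouquets_stepB days k) (0, i0 - b - 1)).2 k := by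
  intro xs
  induction xs with
  | nil =>
    intro i0 b
    simp [PySem.List.enumerate, canMakeBouquets_S]
  | cons d rest ih =>
    intro i0 b
    rw [PySem.List.enumerate_cons]
    have hlen : i0 + (((d :: rest).length : Nat) : Int) = i0 + 1 + (rest.length : Int) := by
      push_cast [List.length_cons]; ring
    rw [hlen]
    by_cases hd : d ≤ days
    · have hnd : ¬ (days < d) := by omega
      simp only [List.filter, hnd, decide_false, List.foldl,
        canMakeBouquets_stepB, hd, if_pos]
      have := ih (i0 + 1) b
      have harith : i0 + 1 - b - 1 = i0 - b - 1 + 1 := by ring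
      rw [harith] at this
      exact this
    · have hnd : days < d := by omega
      simp only [List.filter, hnd, decide_true, List.map, List.foldl,
        canMakeBouquets_stepB, hd, if_neg, not_false_iff]
      show PySem.Int.floordiv (i0 - b - 1) k + canMakeBouquets_S k i0 _ = _
      have := ih (i0 + 1) i0
      have harith : i0 + 1 - i0 - 1 = (0:Int) := by ring
      rw [harith] at this
      simp only [List.append_eq]
      rw [this, foldB_shift days k rest (0 + PySem.Int.floordiv (i0 - b - 1) k) 0]
      ring

-- B's final bouquet count only grows as the fold consumes more days
theorem foldB_mono (days k : Int) (hk : 0 < k) :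
    ∀ (rest : List Int) (t r : Int), 0 ≤ r →
      t + r / k ≤ (rest.foldl (canMakeBouquets_stepB days k) (t, r)).1
        + PySem.Int.floordiv (rest.foldl (canMakeBouquets_stepB days k) (t, r)).2 k := by
  intro rest
  induction rest with
  | nil =>
    intro t r _
    simp [PySem.Int.floordiv_eq_ediv_of_pos hk]
  | cons d rest ih =>
    intro t r hr
    by_cases hd : d ≤ days
    · simp only [List.foldl, canMakeBouquets_stepB, hd, if_pos]
      have h1 := ih t (r + 1) (by omega)
      have h2 : r / k ≤ (r + 1) / k := Int.ediv_le_ediv hk (by omega)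
      omega
    · simp only [List.foldl, canMakeBouquets_stepB, hd, if_neg, not_false_iff]
      have h1 := ih (t + PySem.Int.floordiv r k) 0 le_rfl
      rw [PySem.Int.floordiv_eq_ediv_of_pos hk] at h1 ⊢
      simp only [Int.zero_ediv] at h1
      omega

-- stepping a run: (r+1)/k and (r+1)%k from r/k and r%k
theorem ediv_emod_succ (r k : Int) (hk : 0 < k) (_hr : 0 ≤ r) :
    (r % k + 1 = k → (r + 1) / k = r / k + 1 ∧ (r + 1) % k = 0) ∧
    (r % k + 1 ≠ k → (r + 1) / k = r / k ∧ (r + 1) % k = r % k + 1) := by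
  have hmn : 0 ≤ r % k := Int.emod_nonneg r (by omega)
  have hml : r % k < k := Int.emod_lt_of_pos r hk
  have heq : k * (r / k) + r % k = r := Int.mul_ediv_add_emod r k
  constructor
  · intro h
    have h1 : r + 1 = k * (r / k + 1) := by ring_nf; omega
    constructor
    · rw [h1, Int.mul_ediv_cancel_left _ (by omega)]
    · rw [h1, Int.mul_emod_right]
  · intro h
    have h1 : r + 1 = (r % k + 1) + k * (r / k) := by omega
    have h2 : (r % k + 1) / k = 0 := Int.ediv_eq_zero_of_lt (by omega) (by omega)
    have h3 : (r % k + 1) % k = r % k + 1 := Int.emod_eq_of_lt (by omega) (by omega)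
    constructor
    · rw [h1, Int.add_mul_ediv_left _ _ (by omega : k ≠ 0), h2]; omega
    · rw [h1, Int.add_mul_emod_self_left, h3]

-- main invariant for k > 0: A's state is (t + r/k, r%k) when the fold's state is (t, r)
theorem goA_eq_foldB (days m k : Int) (hk : 0 < k) :
    ∀ (rest : List Int) (t r : Int), 0 ≤ r →
      canMakeBouquets_goA days m k (t + r / k) (r % k) rest
        = decide ((rest.foldl (canMakeBouquets_stepB days k) (t, r)).1
            + PySem.Int.floordiv (rest.foldl (canMakeBouquets_stepB days k) (t, r)).2 k ≥ m) := by
  intro rest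
  induction rest with
  | nil =>
    intro t r _
    simp [canMakeBouquets_goA, PySem.Int.floordiv_eq_ediv_of_pos hk]
  | cons d rest ih =>
    intro t r hr
    have hstep := ediv_emod_succ r k hk hr
    by_cases hd : d ≤ days
    · simp only [canMakeBouquets_goA, List.foldl, canMakeBouquets_stepB, hd, if_pos]
      by_cases hf : r % k + 1 = k
      · obtain ⟨hq, hm'⟩ := hstep.1 hf
        rw [if_pos hf]
        by_cases hb : t + r / k + 1 ≥ m
        · rw [if_pos hb, PySem.Int.floordiv_eq_ediv_of_pos hk]
          have := foldB_mono days k hk rest t (r + 1) (by omega)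
          rw [PySem.Int.floordiv_eq_ediv_of_pos hk] at this
          symm; rw [decide_eq_true_iff]; omega
        · rw [if_neg hb]
          have := ih t (r + 1) (by omega)
          rw [hq, hm', ← add_assoc] at this
          exact this
      · obtain ⟨hq, hm'⟩ := hstep.2 hf
        rw [if_neg hf]
        by_cases hb : t + r / k ≥ m
        · rw [if_pos hb, PySem.Int.floordiv_eq_ediv_of_pos hk]
          have := foldB_mono days k hk rest t (r + 1) (by omega)
          rw [PySem.Int.floordiv_eq_ediv_of_pos hk] at this
          have h2 : r / k ≤ (r + 1) / k := Int.ediv_le_ediv hk (by omega)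
          symm; rw [decide_eq_true_iff]; omega
        · rw [if_neg hb]
          have := ih t (r + 1) (by omega)
          rw [hq, hm'] at this
          exact this
    · simp only [canMakeBouquets_goA, List.foldl, canMakeBouquets_stepB, hd, if_neg,
        not_false_iff]
      by_cases hb : t + r / k ≥ m
      · rw [if_pos hb]
        have := foldB_mono days k hk rest (t + PySem.Int.floordiv r k) 0 le_rfl
        rw [PySem.Int.floordiv_eq_ediv_of_pos hk] at this
        simp only [Int.zero_ediv] at this
        simp only [PySem.Int.floordiv_eq_ediv_of_pos hk]
        symm; rw [decide_eq_true_iff]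
        rw [PySem.Int.floordiv_eq_ediv_of_pos hk] at this
        omega
      · rw [if_neg hb]
        have := ih (t + PySem.Int.floordiv r k) 0 le_rfl
        rw [PySem.Int.floordiv_eq_ediv_of_pos hk] at this
        simp only [Int.zero_ediv, Int.zero_emod, add_zero] at this
        rw [PySem.Int.floordiv_eq_ediv_of_pos hk]
        exact this

-- for k ≤ 0, A never completes a bouquet: flowers + 1 ≥ 1 > k
theorem goA_nonpos (days m k : Int) (hk : k ≤ 0) :
    ∀ (rest : List Int) (f : Int), 0 ≤ f →
      canMakeBouquets_goA days m k 0 f rest = decide ((0:Int) ≥ m) := by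
  intro rest
  induction rest with
  | nil => intro f _; simp [canMakeBouquets_goA]
  | cons d rest ih =>
    intro f hf
    have hne : ¬ (f + 1 = k) := by omega
    by_cases hd : d ≤ days
    · simp only [canMakeBouquets_goA, hd, if_pos]
      rw [if_neg hne]
      by_cases hb : (0:Int) ≥ m
      · rw [if_pos hb]; symm; rw [decide_eq_true_iff]; exact hb
      · rw [if_neg hb]
        exact ih (f + 1) (by omega)
    · simp only [canMakeBouquets_goA, hd, if_neg, not_false_iff]
      by_cases hb : (0:Int) ≥ m
      · rw [if_pos hb]; symm; rw [decide_eq_true_iff]; exact hb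
      · rw [if_neg hb]
        exact ih 0 le_rfl

-- ===== VERDICT (by name: the statement is the Claim_ definition above) =====
theorem canMakeBouquets_py_spec : Claim_equal_canMakeBouquets_py := by
  intro days bloomDay m k _
  unfold Spec_canMakeBouquets_py canMakeBouquets_py canMakeBouquets_py_alt
  by_cases hk : k ≤ 0
  · simp only [hk, if_pos]
    exact goA_nonpos days m k hk bloomDay 0 le_rfl
  · have hk' : 0 < k := by omega
    simp only [hk, if_neg, not_false_iff, List.tail_cons]
    have hS := S_eq_foldB days k bloomDay 0 (-1)
    simp only [zero_add] at hS
    have harith : (0:Int) - (-1) - 1 = 0 := by ring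
    rw [harith] at hS
    simp only [zipSum_eq_S k _ (-1), hS]
    have := goA_eq_foldB days m k hk' bloomDay 0 0 le_rfl
    simpa using this
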